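-- pv_equiv track=rewrite | github.com/BigMautone/ProdigitModelica | esame.py | funzione2
-- ===== SOURCE A (Python) =====
-- def funzione2(lista_stud):
-- 	res = set()
-- 	for i in range(len(lista_stud)):
-- 		if(lista_stud[i][1] >= 9 and lista_stud[i][2] >= 9) or ((lista_stud[i][3] <= 3) or (lista_stud[i][4] <= 5)):
-- 			res.add(int(lista_stud[i][0]))
--
-- 	l = list(res)
-- 	l.sort()
-- 	return l
-- ===== SOURCE B (Python) =====
-- def _ins(out, x):
--     """Insert x into the sorted, duplicate-free list out, keeping it sorted and duplicate-free."""
--     if not out: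
--         return [x]
--     if x < out[0]:
--         return [x] + out
--     if x == out[0]:
--         return out
--     return [out[0]] + _ins(out[1:], x)
--
-- def funzione2(lista_stud):
--     out = []
--     for s in lista_stud:
--         if (s[1] >= 9 and s[2] >= 9) or s[3] <= 3 or s[4] <= 5:
--             out = _ins(out, int(s[0]))
--     return out
-- ===== Notes on version B (the rewrite author's own statement) =====
-- stated objective: alternative
-- what changed: Replaces hash-set accumulation followed by a final sort with an on-the-fly recursive ordered insertion: each qualifying ID is inserted into its sorted position in a duplicate-free accumulator (skipped if already present), so no set and no sort call exist and the sorted-unique invariant is maintained throughout the single pass.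
import Mathlib
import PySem

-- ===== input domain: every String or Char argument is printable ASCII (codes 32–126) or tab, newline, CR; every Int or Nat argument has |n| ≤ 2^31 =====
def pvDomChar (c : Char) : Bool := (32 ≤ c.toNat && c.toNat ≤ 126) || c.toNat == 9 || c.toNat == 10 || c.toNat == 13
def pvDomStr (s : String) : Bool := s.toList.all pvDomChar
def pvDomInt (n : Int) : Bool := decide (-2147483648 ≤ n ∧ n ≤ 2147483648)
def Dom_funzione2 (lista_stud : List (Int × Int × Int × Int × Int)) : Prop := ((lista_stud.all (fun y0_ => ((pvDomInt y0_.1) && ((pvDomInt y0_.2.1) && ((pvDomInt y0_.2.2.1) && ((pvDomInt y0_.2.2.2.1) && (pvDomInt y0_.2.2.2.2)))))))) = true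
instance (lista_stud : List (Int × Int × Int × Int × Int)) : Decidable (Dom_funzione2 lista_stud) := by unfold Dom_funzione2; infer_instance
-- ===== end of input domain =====

-- B replaces A's hash-set accumulation + final sort by on-the-fly recursive ordered insertion
-- into a sorted duplicate-free accumulator (no set, no sort call); alternative structure, not faster.

-- ===== PORT A =====
-- res = set(); for i in range(len(lista_stud)): if cond: res.add(int(lista_stud[i][0])); l = list(res); l.sort(); return l
def funzione2 (lista_stud : List (Int × Int × Int × Int × Int)) : List Int :=
  let res : PySem.Set Int :=
    (PySem.List.pyRange 0 (lista_stud.length : Int) 1).foldl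
      (fun res i =>
        let t := PySem.List.pyGetD lista_stud i (0, 0, 0, 0, 0)
        if (9 ≤ t.2.1 ∧ 9 ≤ t.2.2.1) ∨ t.2.2.2.1 ≤ 3 ∨ t.2.2.2.2 ≤ 5
        then PySem.Set.add res t.1 else res)
      PySem.Set.empty
  -- l = list(res); l.sort(): sorting a set's elements — order-independent consumption
  PySem.List.sorted res (fun x => x) false

-- ===== PORT B =====
-- _ins(out, x): recursive sorted insertion, skipping x if already present
def pvIns (out : List Int) (x : Int) : List Int :=
  match out with
  | [] => [x]
  | a :: t => if x < a then x :: a :: t else if x = a then a :: t else a :: pvIns t x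

def funzione2_alt (lista_stud : List (Int × Int × Int × Int × Int)) : List Int :=
  lista_stud.foldl
    (fun out s =>
      if (9 ≤ s.2.1 ∧ 9 ≤ s.2.2.1) ∨ s.2.2.2.1 ≤ 3 ∨ s.2.2.2.2 ≤ 5
      then pvIns out s.1 else out)
    []

-- ===== PRECONDITION & SPEC =====
def Spec_funzione2 (lista_stud : List (Int × Int × Int × Int × Int)) (out : List Int) : Prop := out = funzione2_alt lista_stud
instance (lista_stud : List (Int × Int × Int × Int × Int)) (out : List Int) : Decidable (Spec_funzione2 lista_stud out) := by unfold Spec_funzione2; infer_instance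

-- ===== CLAIM =====
def Claim_equal_funzione2 : Prop := ∀ (lista_stud : List (Int × Int × Int × Int × Int)), Dom_funzione2 lista_stud → Spec_funzione2 lista_stud (funzione2 lista_stud)

-- ===== LEMMAS AND PROOFS =====

theorem pv_mem_pvIns (out : List Int) (x a : Int) : a ∈ pvIns out x ↔ a ∈ out ∨ a = x := by
  induction out with
  | nil => simp [pvIns]
  | cons b t ih =>
    by_cases h1 : x < b
    · simp [pvIns, h1]; tauto
    · by_cases h2 : x = b
      · subst h2; simp [pvIns, h1]; tauto
      · simp [pvIns, h1, h2, ih]; tauto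

theorem pv_pairwise_pvIns (out : List Int) (x : Int) (h : out.Pairwise (· < ·)) :
    (pvIns out x).Pairwise (· < ·) := by
  induction out with
  | nil => simp [pvIns]
  | cons b t ih =>
    have hbt : ∀ y ∈ t, b < y := (List.pairwise_cons.mp h).1
    have ht : t.Pairwise (· < ·) := (List.pairwise_cons.mp h).2
    by_cases h1 : x < b
    · simp only [pvIns, if_pos h1]
      exact List.pairwise_cons.mpr ⟨fun y hy => by
        rcases List.mem_cons.mp hy with rfl | hy
        · exact h1
        · exact lt_trans h1 (hbt y hy), h⟩
    · by_cases h2 : x = b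
      · simpa [pvIns, h1, h2] using h
      · simp only [pvIns, if_neg h1, if_neg h2]
        refine List.pairwise_cons.mpr ⟨fun y hy => ?_, ih ht⟩
        rcases (pv_mem_pvIns t x y).mp hy with hy | rfl
        · exact hbt y hy
        · omega

theorem pv_foldl_ins_mem (m : List Int) : ∀ (acc : List Int) (a : Int),
    a ∈ m.foldl pvIns acc ↔ a ∈ acc ∨ a ∈ m := by
  induction m with
  | nil => simp
  | cons x m ih =>
    intro acc a
    rw [List.foldl_cons, ih, pv_mem_pvIns]
    simp; tauto

theorem pv_foldl_ins_pairwise (m : List Int) : ∀ (acc : List Int), acc.Pairwise (· < ·) →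
    (m.foldl pvIns acc).Pairwise (· < ·) := by
  induction m with
  | nil => intro acc h; exact h
  | cons x m ih => intro acc h; exact ih _ (pv_pairwise_pvIns acc x h)

-- ===== VERDICT =====
theorem funzione2_spec : Claim_equal_funzione2 := by
  intro l _
  show funzione2 l = funzione2_alt l
  simp only [funzione2, funzione2_alt]
  rw [PySem.List.foldl_pyRange_zero_pyGetD' l (0, 0, 0, 0, 0)
    (fun res t => if (9 ≤ t.2.1 ∧ 9 ≤ t.2.2.1) ∨ t.2.2.2.1 ≤ 3 ∨ t.2.2.2.2 ≤ 5
      then PySem.Set.add res t.1 else res) PySem.Set.empty]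
  rw [PySem.List.foldl_ite_eq_foldl_filter, PySem.List.foldl_ite_eq_foldl_filter]
  set F : List (Int × Int × Int × Int × Int) := l.filter (fun t =>
      decide ((9 ≤ t.2.1 ∧ 9 ≤ t.2.2.1) ∨ t.2.2.2.1 ≤ 3 ∨ t.2.2.2.2 ≤ 5)) with hF
  set m : List Int := F.map (fun t => t.1) with hm
  have hA : F.foldl (fun res t => PySem.Set.add res t.1) PySem.Set.empty
      = PySem.Set.ofList m := by
    rw [PySem.Set.ofList_eq_foldl, hm, List.foldl_map]; rfl
  have hB : F.foldl (fun out s => pvIns out s.1) [] = m.foldl pvIns [] := by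
    rw [hm, List.foldl_map]
  rw [hA, hB]
  have hpair : (m.foldl pvIns []).Pairwise (· < ·) :=
    pv_foldl_ins_pairwise m [] (by simp)
  apply PySem.List.sorted_eq_of_perm_of_pairwise_lt
  · refine (List.perm_ext_iff_of_nodup hpair.nodup (PySem.Set.nodup_ofList m)).mpr ?_
    intro a
    rw [PySem.Set.mem_ofList, pv_foldl_ins_mem]
    simp
  · exact hpair
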